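-- pv_equiv track=rewrite | github.com/flounderK/hackasat-3-finals-solves | ftp/ftpexp.py | group_by_increment
-- ===== SOURCE A (Python) =====
-- def group_by_increment(iterable, group_incr):
--     """
--     Identify series of values that increment/decrement
--     by the same amount, grouping them into lists.
--     Useful for finding heap chunks next to eachother
--     from large leaks
--     """
--     grouped = []
--     current = [iterable[0]]
--     for i in range(1, len(iterable)):
--         curr_val = iterable[i]
--         prev_val = current[-1]
--         if (prev_val + group_incr) == curr_val:
--             current.append(curr_val)
--         else:
--             grouped.append(current)
--             current = [curr_val]
--     if current:
--         grouped.append(current)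
--     return grouped
-- ===== SOURCE B (Python) =====
-- def group_by_increment(iterable, group_incr):
--     """
--     Identify series of values that increment/decrement
--     by the same amount, grouping them into lists.
--     Run-peeling variant: scan forward to the end of each
--     maximal increment run, then slice it out in one go.
--     """
--     groups = []
--     i, n = 0, len(iterable)
--     while i < n:
--         j = i + 1
--         while j < n and iterable[j] == iterable[j - 1] + group_incr:
--             j += 1
--         groups.append(list(iterable[i:j]))
--         i = j
--     return groups
-- ===== Notes on version B (the rewrite author's own statement) =====
-- stated objective: alternative
-- what changed: A threads a (grouped, current) accumulator pair through one element-wise pass; B peels maximal runs with a two-level scan (inner scan finds each run's end, the run is sliced out whole) with no accumulator state.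
import Mathlib
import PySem

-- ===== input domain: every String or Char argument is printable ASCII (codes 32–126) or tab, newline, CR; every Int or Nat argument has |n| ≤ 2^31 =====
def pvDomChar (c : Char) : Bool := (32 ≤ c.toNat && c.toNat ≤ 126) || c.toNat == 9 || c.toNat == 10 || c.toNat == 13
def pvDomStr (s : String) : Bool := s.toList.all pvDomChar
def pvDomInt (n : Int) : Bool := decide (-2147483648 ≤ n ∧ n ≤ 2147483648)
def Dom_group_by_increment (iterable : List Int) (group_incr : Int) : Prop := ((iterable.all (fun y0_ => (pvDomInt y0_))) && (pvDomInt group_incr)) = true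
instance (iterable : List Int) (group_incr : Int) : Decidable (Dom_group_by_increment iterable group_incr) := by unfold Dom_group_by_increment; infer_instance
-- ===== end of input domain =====

-- B replaces A's (grouped, current) accumulator pass by run-peeling: take each maximal
-- increment run off the front and recurse on the rest (alternative decomposition, same cost).


-- ===== PORT A =====
-- Python A: current := [iterable[0]]; the loop over i in range(1, len) visits exactly the
-- tail elements in order, so it is ported as a foldl over the tail with the same
-- (grouped, current) state; stepA is the literal loop body (branches and appends step for step).
def stepA (group_incr : Int) (s : List (List Int) × List Int) (curr_val : Int) :
    List (List Int) × List Int :=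
  let prev_val := s.2.getLastD 0
  if prev_val + group_incr = curr_val then (s.1, s.2 ++ [curr_val])
  else (s.1 ++ [s.2], [curr_val])

def group_by_increment (iterable : List Int) (group_incr : Int) : List (List Int) :=
  match iterable with
  | [] => []  -- Python raises IndexError at iterable[0]; excluded by Pre_
  | x :: xs =>
    let s := xs.foldl (stepA group_incr) (([] : List (List Int)), [x])
    if s.2 = [] then s.1 else s.1 ++ [s.2]

-- ===== PORT B =====
-- inner while loop of Source B: collect values while each equals previous + incr,
-- returning (run taken, remainder).
def takeRun (group_incr prev : Int) : List Int → List Int × List Int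
  | [] => ([], [])
  | y :: ys =>
    if y = prev + group_incr then
      ((y :: (takeRun group_incr y ys).1), (takeRun group_incr y ys).2)
    else ([], y :: ys)

theorem takeRun_snd_length_le (group_incr prev : Int) (l : List Int) :
    (takeRun group_incr prev l).2.length ≤ l.length := by
  induction l generalizing prev with
  | nil => simp [takeRun]
  | cons y ys ih =>
    simp only [takeRun]
    split
    · exact le_trans (ih y) (Nat.le_succ _)
    · simp

-- outer while loop of Source B: peel one maximal run, recurse on the remainder.
def group_by_increment_alt (iterable : List Int) (group_incr : Int) : List (List Int) :=
  match iterable with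
  | [] => []
  | x :: xs =>
    (x :: (takeRun group_incr x xs).1) ::
      group_by_increment_alt (takeRun group_incr x xs).2 group_incr
termination_by iterable.length
decreasing_by
  exact Nat.lt_succ_of_le (takeRun_snd_length_le group_incr x xs)

-- ===== PRECONDITION & SPEC =====
-- Pre_ excludes only the empty list, on which Python A raises IndexError.
def Pre_group_by_increment (iterable : List Int) (group_incr : Int) : Prop := iterable ≠ []
instance (iterable : List Int) (group_incr : Int) : Decidable (Pre_group_by_increment iterable group_incr) := by unfold Pre_group_by_increment; infer_instance
def pvWitness_group_by_increment : List Int × Int := ([3, 4, 5, 9, 10, 2], 1)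

def Spec_group_by_increment (iterable : List Int) (group_incr : Int) (out : List (List Int)) : Prop := out = group_by_increment_alt iterable group_incr
instance (iterable : List Int) (group_incr : Int) (out : List (List Int)) : Decidable (Spec_group_by_increment iterable group_incr out) := by unfold Spec_group_by_increment; infer_instance

-- ===== CLAIM (what is proved, stated in full; the proofs are below) =====
def Claim_equal_group_by_increment : Prop := ∀ (iterable : List Int) (group_incr : Int), Dom_group_by_increment iterable group_incr → Pre_group_by_increment iterable group_incr → Spec_group_by_increment iterable group_incr (group_by_increment iterable group_incr)

-- ===== LEMMAS AND PROOFS =====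

-- B's result with an already-started (nonempty) current group c.
def runsFrom (group_incr : Int) (c : List Int) (xs : List Int) : List (List Int) :=
  (c ++ (takeRun group_incr (c.getLastD 0) xs).1) ::
    group_by_increment_alt (takeRun group_incr (c.getLastD 0) xs).2 group_incr

theorem foldA_runsFrom (group_incr : Int) (xs : List Int) :
    ∀ (g : List (List Int)) (c : List Int), c ≠ [] →
      (let s := xs.foldl (stepA group_incr) (g, c);
        (if s.2 = [] then s.1 else s.1 ++ [s.2])) = g ++ runsFrom group_incr c xs := by
  induction xs with
  | nil =>
    intro g c hc
    simp [takeRun, runsFrom, group_by_increment_alt, hc]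
  | cons y ys ih =>
    intro g c hc
    simp only [List.foldl_cons]
    by_cases h : c.getLast?.getD 0 + group_incr = y
    · have step : stepA group_incr (g, c) y = (g, c ++ [y]) := by
        simp [stepA, List.getLastD_eq_getLast?, h]
      rw [step, ih g (c ++ [y]) (by simp)]
      have hy : y = c.getLast?.getD 0 + group_incr := h.symm
      simp [runsFrom, takeRun, List.getLastD_eq_getLast?, ← hy]
    · have step : stepA group_incr (g, c) y = (g ++ [c], [y]) := by
        simp [stepA, List.getLastD_eq_getLast?, h]
      rw [step, ih (g ++ [c]) [y] (by simp)]
      have hy : ¬ y = c.getLast?.getD 0 + group_incr := fun e => h e.symm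
      conv_rhs => rw [runsFrom, group_by_increment_alt.eq_def]
      simp [runsFrom, takeRun, List.getLastD_eq_getLast?, hy, List.append_assoc]

-- ===== VERDICT (by name: the statement is the Claim_ definition above) =====
theorem group_by_increment_spec : Claim_equal_group_by_increment := by
  intro iterable group_incr _ hpre
  unfold Spec_group_by_increment
  match iterable with
  | [] => exact absurd rfl hpre
  | x :: xs =>
    have h := foldA_runsFrom group_incr xs [] [x] (by simp)
    conv_rhs => rw [group_by_increment_alt.eq_def]
    simpa [group_by_increment, runsFrom] using h
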